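-- pv_equiv track=rewrite | github.com/junebug-junie/Orion-Sapienform | services/orion-agent-chain/app/api.py | _pick_finalization_tool
-- ===== SOURCE A (Python) =====
-- def _pick_finalization_tool(tool_ids: list[str]) -> str | None:
--     preferred = [
--         "finalize_response",
--         "write_recommendation",
--         "summarize_context",
--         "evaluate",
--         "write_guide",
--     ]
--     for tool_id in preferred:
--         if tool_id in tool_ids:
--             return tool_id
--     return None
-- ===== SOURCE B (Python) =====
-- def _pick_finalization_tool(tool_ids: list[str]) -> str | None:
--     preferred = [
--         "finalize_response",
--         "write_recommendation",
--         "summarize_context",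
--         "evaluate",
--         "write_guide",
--     ]
--     rank = {t: i for i, t in enumerate(preferred)}
--     best = None
--     for t in tool_ids:
--         r = rank.get(t)
--         if r is not None and (best is None or r < best):
--             best = r
--     return None if best is None else preferred[best]
-- ===== Notes on version B (the rewrite author's own statement) =====
-- stated objective: alternative
-- what changed: B scans the input list once, mapping each id to its priority via a precomputed rank dict and keeping the minimum rank, instead of scanning the preference list and testing membership in the input for each preferred id.
import Mathlib
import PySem

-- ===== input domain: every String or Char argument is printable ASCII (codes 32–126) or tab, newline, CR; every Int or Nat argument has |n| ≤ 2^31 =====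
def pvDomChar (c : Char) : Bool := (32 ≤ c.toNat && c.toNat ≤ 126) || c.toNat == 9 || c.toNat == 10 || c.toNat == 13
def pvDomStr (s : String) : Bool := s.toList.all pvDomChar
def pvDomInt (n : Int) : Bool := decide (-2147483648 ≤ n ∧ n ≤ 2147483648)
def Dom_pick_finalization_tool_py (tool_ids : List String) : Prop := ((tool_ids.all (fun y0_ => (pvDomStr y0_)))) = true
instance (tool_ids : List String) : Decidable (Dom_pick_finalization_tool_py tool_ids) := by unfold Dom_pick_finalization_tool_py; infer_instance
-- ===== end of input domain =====

-- B replaces A's scan of the preference list (with a membership test in tool_ids per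
-- preferred id) by a single pass over tool_ids keeping the minimum priority rank
-- from a precomputed rank dict (objective: alternative decomposition, same result).

-- ===== PORT A =====
-- 'for tool_id in preferred: if tool_id in tool_ids: return tool_id; return None'
def pvPreferredA : List String :=
  ["finalize_response", "write_recommendation", "summarize_context", "evaluate", "write_guide"]

def pick_finalization_tool_py (tool_ids : List String) : Option String :=
  pvPreferredA.find? (fun tool_id => tool_ids.contains tool_id)

-- ===== PORT B =====
def pvPreferredB : List String :=
  ["finalize_response", "write_recommendation", "summarize_context", "evaluate", "write_guide"]

-- rank = {t: i for i, t in enumerate(preferred)}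
def pvRank : PySem.Dict String Int :=
  (PySem.List.enumerate pvPreferredB 0).foldl (fun d p => d.insert p.2 p.1) PySem.Dict.empty

-- the loop body: r = rank.get(t); if r is not None and (best is None or r < best): best = r
def pvStep (best : Option Int) (t : String) : Option Int :=
  match PySem.Dict.get? pvRank t with
  | none => best
  | some r =>
    match best with
    | none => some r
    | some b => if r < b then some r else best

def pick_finalization_tool_py_alt (tool_ids : List String) : Option String :=
  match tool_ids.foldl pvStep none with
  | none => none
  | some b => PySem.List.pyGet? pvPreferredB b   -- preferred[best]; b is always a valid index here

-- ===== PRECONDITION & SPEC =====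
def Spec_pick_finalization_tool_py (tool_ids : List String) (out : Option String) : Prop := out = pick_finalization_tool_py_alt tool_ids
instance (tool_ids : List String) (out : Option String) : Decidable (Spec_pick_finalization_tool_py tool_ids out) := by unfold Spec_pick_finalization_tool_py; infer_instance

-- ===== CLAIM (what is proved, stated in full; the proofs are below) =====
def Claim_equal_pick_finalization_tool_py : Prop := ∀ (tool_ids : List String), Dom_pick_finalization_tool_py tool_ids → Spec_pick_finalization_tool_py tool_ids (pick_finalization_tool_py tool_ids)

-- ===== LEMMAS AND PROOFS =====

-- minimum-rank of a whole list, stated via memberships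
def pvMinRank (l : List String) : Option Int :=
  if l.contains "finalize_response" then some 0
  else if l.contains "write_recommendation" then some 1
  else if l.contains "summarize_context" then some 2
  else if l.contains "evaluate" then some 3
  else if l.contains "write_guide" then some 4
  else none

def pvOmin (a b : Option Int) : Option Int :=
  match a, b with
  | none, b => b
  | some i, none => some i
  | some i, some j => some (min i j)

theorem pvRank_eq : pvRank = PySem.Dict.mk
    [("finalize_response", 0), ("write_recommendation", 1), ("summarize_context", 2),
     ("evaluate", 3), ("write_guide", 4)] := by decide

theorem pvStep_eq_omin (b : Option Int) (t : String) :
    pvStep b t = pvOmin b (PySem.Dict.get? pvRank t) := by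
  unfold pvStep pvOmin
  cases h : PySem.Dict.get? pvRank t with
  | none => cases b <;> rfl
  | some r =>
    cases b with
    | none => rfl
    | some bb =>
      simp only []
      by_cases hr : r < bb
      · simp [hr, le_of_lt hr]
      · simp [hr, min_def]

theorem pvOmin_assoc (a b c : Option Int) : pvOmin (pvOmin a b) c = pvOmin a (pvOmin b c) := by
  cases a <;> cases b <;> cases c <;> simp [pvOmin, min_assoc]

theorem pvFoldl_omin (l : List String) (b : Option Int) :
    l.foldl pvStep b = pvOmin b (l.foldl pvStep none) := by
  induction l generalizing b with
  | nil => cases b <;> rfl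
  | cons t l ih =>
    simp only [List.foldl_cons]
    rw [ih (pvStep b t), ih (pvStep none t), pvStep_eq_omin, pvStep_eq_omin none t]
    have : pvOmin none (PySem.Dict.get? pvRank t) = PySem.Dict.get? pvRank t := by
      cases PySem.Dict.get? pvRank t <;> rfl
    rw [this, pvOmin_assoc]

theorem pvFoldl_eq_minRank (l : List String) : l.foldl pvStep none = pvMinRank l := by
  induction l with
  | nil => rfl
  | cons t l ih =>
    simp only [List.foldl_cons]
    rw [pvFoldl_omin, ih, pvStep_eq_omin]
    have hnone : pvOmin none (PySem.Dict.get? pvRank t) = PySem.Dict.get? pvRank t := by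
      cases PySem.Dict.get? pvRank t <;> rfl
    rw [hnone]
    by_cases h0 : t = "finalize_response"
    · subst h0; simp [pvMinRank, pvRank_eq, PySem.Dict.get?_mk_cons, pvOmin]
      split_ifs <;> simp_all [pvOmin]
    · by_cases h1 : t = "write_recommendation"
      · subst h1; simp [pvMinRank, pvRank_eq, PySem.Dict.get?_mk_cons, pvOmin]
        split_ifs <;> simp_all [pvOmin]
      · by_cases h2 : t = "summarize_context"
        · subst h2; simp [pvMinRank, pvRank_eq, PySem.Dict.get?_mk_cons, pvOmin]
          split_ifs <;> simp_all [pvOmin]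
        · by_cases h3 : t = "evaluate"
          · subst h3; simp [pvMinRank, pvRank_eq, PySem.Dict.get?_mk_cons, pvOmin]
            split_ifs <;> simp_all [pvOmin]
          · by_cases h4 : t = "write_guide"
            · subst h4; simp [pvMinRank, pvRank_eq, PySem.Dict.get?_mk_cons, pvOmin]
              split_ifs <;> simp_all [pvOmin]
            · have hr : PySem.Dict.get? pvRank t = none := by
                rw [pvRank_eq]
                simp [PySem.Dict.get?_mk_cons, beq_iff_eq, Ne.symm h0, Ne.symm h1,
                  Ne.symm h2, Ne.symm h3, Ne.symm h4]
                rfl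
              rw [hr]
              simp [pvMinRank, pvOmin]
              split_ifs <;> simp_all [pvOmin]

-- ===== VERDICT (by name: the statement is the Claim_ definition above) =====
theorem pick_finalization_tool_py_spec : Claim_equal_pick_finalization_tool_py := by
  intro tool_ids _
  unfold Spec_pick_finalization_tool_py
  unfold pick_finalization_tool_py pick_finalization_tool_py_alt
  rw [pvFoldl_eq_minRank]
  unfold pvMinRank pvPreferredA
  simp only [List.find?]
  split_ifs with c0 c1 c2 c3 c4 <;> simp_all <;> rfl
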